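-- pv_equiv track=rewrite | github.com/yetingjian/interface-test | interfaceTest/pyworkspace/deployment/test2.py | derial_recv_packe_convert
-- ===== SOURCE A (Python) =====
-- def derial_recv_packe_convert(data):
--     index = 1
--     #convert_list = data
--     for i in range(1, len(data) - 2):
--         if data[index] == 0xFD:
--             if data[index - 1] == 0x7F:
--                 data[index - 1] = 0xFF
--                 data.pop(index)
--                 index -= 1
--             elif data[index - 1] == 0x7E:
--                 data[index - 1] = 0xFE
--                 data.pop(index)
--                 index -= 1
--             elif data[index - 1] == 0x7D:
--                 data[index - 1] = 0xFD
--                 data.pop(index)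
--                 index -= 1
--         index += 1
--     return data
-- ===== SOURCE B (Python) =====
-- # Single forward pass building a new list instead of in-place mid-list pops.
-- # Note: A mutates its argument in place and returns it; B leaves the argument
-- # untouched and returns a fresh list -- equivalence is about the return value.
-- def derial_recv_packe_convert(data):
--     n = len(data)
--     if n <= 3:
--         return data
--     out = []
--     last = data[0]
--     for b in data[1:n - 2]:
--         if b == 0xFD and 0x7D <= last <= 0x7F:
--             last += 0x80
--         else:
--             out.append(last)
--             last = b
--     out.append(last)
--     out.extend(data[n - 2:])
--     return out
-- ===== Notes on version B (the rewrite author's own statement) =====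
-- stated objective: alternative
-- what changed: A rescans the list it mutates in place, popping escape bytes out of the middle; B makes one forward pass over the input carrying a pending byte, merging each escape pair as it goes and appending to a fresh output list.
import Mathlib
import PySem

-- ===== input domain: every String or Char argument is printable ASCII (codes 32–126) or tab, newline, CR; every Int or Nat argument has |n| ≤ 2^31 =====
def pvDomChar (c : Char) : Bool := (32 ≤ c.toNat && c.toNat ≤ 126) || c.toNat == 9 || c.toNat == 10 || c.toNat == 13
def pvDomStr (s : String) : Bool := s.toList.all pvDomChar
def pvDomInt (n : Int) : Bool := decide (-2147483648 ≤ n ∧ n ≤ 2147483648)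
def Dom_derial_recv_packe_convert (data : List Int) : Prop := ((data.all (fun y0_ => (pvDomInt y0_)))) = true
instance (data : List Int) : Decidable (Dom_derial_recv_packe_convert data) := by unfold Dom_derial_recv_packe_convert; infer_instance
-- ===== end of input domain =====

-- B replaces A's in-place scan with mid-list pops by one forward pass that builds a
-- fresh list. A mutates its argument and returns it; B leaves the argument untouched
-- and returns a new list — the equivalence proved here is about the return value only.

-- ===== PORT A =====
-- one iteration of A's loop body; state = (data, index). The 'none' arms of the
-- matches are Python's IndexError, which this loop never reaches (every pyGet?/pop?
-- index is in range on A's states), so they return the state unchanged.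
def pvStepA (st : List Int × Int) : List Int × Int :=
  match PySem.List.pyGet? st.1 st.2 with
  | none => st
  | some c =>
    if c = 0xFD then
      match PySem.List.pyGet? st.1 (st.2 - 1) with
      | none => st
      | some p =>
        if p = 0x7F then
          match PySem.List.pop? (PySem.List.pySetD st.1 (st.2 - 1) 0xFF) st.2 with
          | none => st
          | some r => (r.2, st.2)          -- index -= 1, then the loop's index += 1
        else if p = 0x7E then
          match PySem.List.pop? (PySem.List.pySetD st.1 (st.2 - 1) 0xFE) st.2 with
          | none => st
          | some r => (r.2, st.2)
        else if p = 0x7D then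
          match PySem.List.pop? (PySem.List.pySetD st.1 (st.2 - 1) 0xFD) st.2 with
          | none => st
          | some r => (r.2, st.2)
        else (st.1, st.2 + 1)
    else (st.1, st.2 + 1)

def derial_recv_packe_convert (data : List Int) : List Int :=
  ((PySem.List.pyRange 1 ((data.length : Int) - 2) 1).foldl
    (fun st _ => pvStepA st) (data, 1)).1

-- ===== PORT B =====
-- loop body of Source B; state = (out, last)
def pvStepB (st : List Int × Int) (b : Int) : List Int × Int :=
  if b = 0xFD ∧ 0x7D ≤ st.2 ∧ st.2 ≤ 0x7F then (st.1, st.2 + 0x80)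
  else (st.1 ++ [st.2], b)

def derial_recv_packe_convert_alt (data : List Int) : List Int :=
  if data.length ≤ 3 then data
  else
    match data with
    | [] => []                             -- unreachable: length > 3
    | d0 :: _ =>
      let p := (PySem.List.slice data (some 1) (some ((data.length : Int) - 2))).foldl
                 pvStepB ([], d0)
      (p.1 ++ [p.2]) ++ PySem.List.slice data (some ((data.length : Int) - 2)) none

-- ===== PRECONDITION & SPEC =====
def Spec_derial_recv_packe_convert (data : List Int) (out : List Int) : Prop := out = derial_recv_packe_convert_alt data
instance (data : List Int) (out : List Int) : Decidable (Spec_derial_recv_packe_convert data out) := by unfold Spec_derial_recv_packe_convert; infer_instance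

-- ===== CLAIM (what is proved, stated in full; the proofs are below) =====
def Claim_equal_derial_recv_packe_convert : Prop := ∀ (data : List Int), Dom_derial_recv_packe_convert data → Spec_derial_recv_packe_convert data (derial_recv_packe_convert data)

-- ===== LEMMAS AND PROOFS =====

-- setting position |out| of out ++ a :: t
lemma pv_set_append (out t : List Int) (a v : Int) :
    (out ++ a :: t).set out.length v = out ++ v :: t := by
  induction out with
  | nil => rfl
  | cons x xs ih => simp [ih]

-- erasing position |out| + 1 of out ++ a :: b :: t
lemma pv_erase_append (out t : List Int) (a b : Int) :
    (out ++ a :: b :: t).eraseIdx (out.length + 1) = out ++ a :: t := by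
  induction out with
  | nil => rfl
  | cons x xs ih => simp [ih]

-- one step of A on a state of the invariant shape (processed prefix out, pending
-- byte last, nonempty remainder r :: rs) is one step of B's fold
lemma pv_stepA_eq (out rs : List Int) (last r : Int) :
    pvStepA (out ++ last :: r :: rs, (out.length : Int) + 1)
      = (let q := pvStepB (out, last) r; (q.1 ++ q.2 :: rs, (q.1.length : Int) + 1)) := by
  have hget : PySem.List.pyGet? (out ++ last :: r :: rs) ((out.length : Int) + 1) = some r := by
    have := PySem.List.pyGet?_append_right (pre := out) (ys := last :: r :: rs) (k := 1)
    simpa using this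
  have hidx : ((out.length : Int) + 1 - 1) = (out.length : Int) := by ring
  have hprev : PySem.List.pyGet? (out ++ last :: r :: rs) ((out.length : Int) + 1 - 1) = some last := by
    rw [hidx, PySem.List.pyGet?_append_length]
  have hset : ∀ v : Int, PySem.List.pySetD (out ++ last :: r :: rs) ((out.length : Int) + 1 - 1) v
      = out ++ v :: r :: rs := by
    intro v; rw [hidx, PySem.List.pySetD_natCast, pv_set_append]
  have hpop : ∀ v : Int, PySem.List.pop? (out ++ v :: r :: rs) ((out.length : Int) + 1)
      = some (r, out ++ v :: rs) := by
    intro v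
    have h1 : ((out.length : Int) + 1) = ((out.length + 1 : Nat) : Int) := by push_cast; ring
    have h2 := PySem.List.pop?_natCast (out ++ v :: r :: rs) (out.length + 1) (by simp)
    have hg : (out ++ v :: r :: rs)[out.length + 1] = r := by
      simp [List.getElem_append_right]
    rw [h1, h2, pv_erase_append, hg]
  by_cases hr : r = 0xFD
  · subst hr
    by_cases h7F : last = 0x7F
    · subst h7F
      simp only [pvStepA, hget, hprev, hset, hpop, pvStepB]
      norm_num
    · by_cases h7E : last = 0x7E
      · subst h7E
        simp only [pvStepA, hget, hprev, hset, hpop, pvStepB]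
        norm_num
      · by_cases h7D : last = 0x7D
        · subst h7D
          simp only [pvStepA, hget, hprev, hset, hpop, pvStepB]
          norm_num
        · have hfalse : ¬ ((0x7D : Int) ≤ last ∧ last ≤ 0x7F) := by
            intro h; exact absurd rfl (by omega : last ≠ last)
          simp only [pvStepA, hget, hprev, pvStepB]
          simp [h7F, h7E, h7D, hfalse]
  · simp only [pvStepA, hget, pvStepB]
    simp [hr]

-- loop invariant: A's fold over any index list (the indices are unused, as in the
-- Python) consumes one remainder element per iteration and tracks B's fold on the
-- consumed prefix
lemma pv_loop (idxs : List Int) : ∀ (out rest : List Int) (last : Int),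
    idxs.length ≤ rest.length →
    idxs.foldl (fun st _ => pvStepA st) (out ++ last :: rest, (out.length : Int) + 1)
      = (let p := (rest.take idxs.length).foldl pvStepB (out, last);
         (p.1 ++ p.2 :: rest.drop idxs.length, (p.1.length : Int) + 1)) := by
  induction idxs with
  | nil => intro out rest last _; simp
  | cons i t ih =>
    intro out rest last h
    match rest with
    | r :: rs =>
      simp only [List.length_cons] at h
      simp only [List.foldl_cons]
      rw [pv_stepA_eq]
      have := ih (pvStepB (out, last) r).1 rs (pvStepB (out, last) r).2 (by omega)
      simpa using this

-- ===== VERDICT (by name: the statement is the Claim_ definition above) =====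
theorem derial_recv_packe_convert_spec : Claim_equal_derial_recv_packe_convert := by
  intro data _
  unfold Spec_derial_recv_packe_convert
  by_cases h3 : data.length ≤ 3
  · rw [derial_recv_packe_convert, derial_recv_packe_convert_alt.eq_def]
    rw [PySem.List.pyRange_one_eq_nil (by omega)]
    simp [h3]
  · match data with
    | [] => simp at h3
    | d0 :: rest =>
      have hm : 4 ≤ rest.length + 1 := by simpa using Nat.lt_of_not_le h3
      rw [derial_recv_packe_convert, derial_recv_packe_convert_alt.eq_def]
      simp only [if_neg h3]
      have hlen : (PySem.List.pyRange 1 (((d0 :: rest).length : Int) - 2) 1).length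
          = rest.length - 2 := by
        rw [PySem.List.length_pyRange_one]; simp; omega
      have hstart : ((d0 :: rest), (1 : Int)) = (([] : List Int) ++ d0 :: rest, (([] : List Int).length : Int) + 1) := by simp
      rw [hstart, pv_loop _ _ _ _ (by rw [hlen]; omega), hlen]
      have hb : (((d0 :: rest).length : Int) - 2) = ((rest.length - 1 : Nat) : Int) := by
        simp; omega
      have hslice1 : PySem.List.slice (d0 :: rest) (some 1) (some (((d0 :: rest).length : Int) - 2))
          = rest.take (rest.length - 2) := by
        rw [hb, show ((1 : Int)) = ((1 : Nat) : Int) from rfl, PySem.List.slice_natCast]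
        simp only [List.drop_one, List.tail_cons]
        congr 1
      have hslice2 : PySem.List.slice (d0 :: rest) (some (((d0 :: rest).length : Int) - 2)) none
          = rest.drop (rest.length - 2) := by
        rw [hb, PySem.List.slice_from_natCast,
            show rest.length - 1 = (rest.length - 2) + 1 from by omega, List.drop_succ_cons]
      rw [hslice1, hslice2]
      simp
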